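-- pv_equiv track=rewrite | github.com/Cyb3r0xAH/zatca-1 | src/services/zatca_api_client.py | validate_invoice_type
-- ===== SOURCE A (Python) =====
-- def validate_invoice_type(invoice_type: str) -> bool:
--     """
--     Validate invoice type functionality map
--
--     Args:
--         invoice_type: 4-digit binary string (TSCZ format)
--
--     Returns:
--         True if valid, False otherwise
--     """
--
--     if len(invoice_type) != 4:
--         return False
--
--     if not all(c in '01' for c in invoice_type):
--         return False
--
--     if invoice_type == "0000":
--         return False
--
--     return True
-- ===== SOURCE B (Python) =====
-- # B: precompute the full table of valid codes (every 4-bit binary string except '0000')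
-- # once, and reduce the whole validation to a single set-membership test.
-- VALID_INVOICE_TYPES = frozenset(format(i, '04b') for i in range(1, 16))
--
--
-- def validate_invoice_type(invoice_type: str) -> bool:
--     return invoice_type in VALID_INVOICE_TYPES
-- ===== Notes on version B (the rewrite author's own statement) =====
-- stated objective: simpler
-- what changed: Replaces A's three staged guards (length check, per-character scan, '0000' exclusion) by a one-time precomputed table of all 15 valid codes and a single set-membership test.
import Mathlib
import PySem

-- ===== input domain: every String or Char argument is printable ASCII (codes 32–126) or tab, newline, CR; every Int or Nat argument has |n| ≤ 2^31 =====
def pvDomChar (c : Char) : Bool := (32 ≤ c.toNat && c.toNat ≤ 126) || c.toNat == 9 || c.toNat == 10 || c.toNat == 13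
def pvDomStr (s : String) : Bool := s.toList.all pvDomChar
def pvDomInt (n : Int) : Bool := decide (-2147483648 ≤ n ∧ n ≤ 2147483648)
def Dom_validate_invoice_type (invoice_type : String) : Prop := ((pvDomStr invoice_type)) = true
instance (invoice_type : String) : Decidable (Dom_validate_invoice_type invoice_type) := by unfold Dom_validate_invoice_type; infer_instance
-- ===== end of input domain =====

-- B precomputes the set of all fifteen valid codes once and tests membership;
-- A runs three staged guards (length, per-character scan, '0000' exclusion). Same result, simpler B.

-- ===== PORT A =====
def validate_invoice_type (invoice_type : String) : Bool :=
  if PySem.Str.len invoice_type ≠ 4 then false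
  else if ¬ (invoice_type.toList.all (fun c => "01".toList.contains c)) then false
  else if invoice_type = "0000" then false
  else true

-- ===== PORT B =====
-- frozenset(format(i, '04b') for i in range(1, 16)), built once at module level
def pvValidInvoiceTypes : List String :=
  PySem.Set.ofList ((PySem.List.pyRange 1 16 1).map (fun i => PySem.Str.zfill (PySem.Int.toBin i) 4))

def validate_invoice_type_alt (invoice_type : String) : Bool :=
  pvValidInvoiceTypes.contains invoice_type

-- ===== PRECONDITION & SPEC =====
def Spec_validate_invoice_type (invoice_type : String) (out : Bool) : Prop := out = validate_invoice_type_alt invoice_type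
instance (invoice_type : String) (out : Bool) : Decidable (Spec_validate_invoice_type invoice_type out) := by unfold Spec_validate_invoice_type; infer_instance

-- ===== CLAIM (what is proved, stated in full; the proofs are below) =====
def Claim_equal_validate_invoice_type : Prop := ∀ (invoice_type : String), Dom_validate_invoice_type invoice_type → Spec_validate_invoice_type invoice_type (validate_invoice_type invoice_type)

-- ===== LEMMAS AND PROOFS =====
theorem validate_invoice_type_ab_eq (s : String) :
    validate_invoice_type s = validate_invoice_type_alt s := by
  obtain ⟨l, rfl⟩ : ∃ l, s = String.ofList l := ⟨s.toList, (String.ofList_toList (s := s)).symm⟩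
  have hcodes : pvValidInvoiceTypes = ["0001","0010","0011","0100","0101","0110","0111","1000","1001","1010","1011","1100","1101","1110","1111"] := by decide
  unfold validate_invoice_type validate_invoice_type_alt
  rw [hcodes]
  rcases l with _ | ⟨a, _ | ⟨b, _ | ⟨c, _ | ⟨d, _ | ⟨e, rest⟩⟩⟩⟩⟩ <;>
    simp [PySem.Str.len_eq, String.ext_iff, List.contains_eq_mem]
  · by_cases ha : a = '0' <;> by_cases ha' : a = '1' <;> by_cases hb : b = '0' <;> by_cases hb' : b = '1' <;>
      by_cases hc : c = '0' <;> by_cases hc' : c = '1' <;> by_cases hd : d = '0' <;> by_cases hd' : d = '1' <;>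
      simp_all
  · exact fun h => absurd h (by omega)

-- ===== VERDICT (by name: the statement is the Claim_ definition above) =====
theorem validate_invoice_type_spec : Claim_equal_validate_invoice_type := by
  intro s _
  exact validate_invoice_type_ab_eq s
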